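-- pv_equiv track=rewrite | github.com/Celsuss/leetcode-solutions | 3.longest-substring-without-repeating-characters.py | shrinkSubStr
-- ===== SOURCE A (Python) =====
-- def shrinkSubStr(substr, substr_set, c):
--     # Remove each element from start of array until we find duplicate character
--     for i in range(len(substr)):
--         i_c = substr[i]
--         substr_set.discard(i_c)
--         if i_c == c:
--             substr = substr[i+1:]
--             return substr
--     return substr
-- ===== SOURCE B (Python) =====
-- def shrinkSubStr(substr, substr_set, c):
--     # Two-phase: locate every position of c first, then discard and slice.
--     hits = [i for i, ch in enumerate(substr) if ch == c]
--     if hits: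
--         cut = hits[0] + 1
--         for ch in substr[:cut]:
--             substr_set.discard(ch)
--         return substr[cut:]
--     for ch in substr:
--         substr_set.discard(ch)
--     return substr
-- ===== Notes on version B (the rewrite author's own statement) =====
-- stated objective: alternative
-- what changed: A's fused scan-discard-and-early-return loop is split into two phases: a comprehension collects all match positions, then the located prefix (or the whole string) is bulk-discarded and the answer produced by one slice.
import Mathlib
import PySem

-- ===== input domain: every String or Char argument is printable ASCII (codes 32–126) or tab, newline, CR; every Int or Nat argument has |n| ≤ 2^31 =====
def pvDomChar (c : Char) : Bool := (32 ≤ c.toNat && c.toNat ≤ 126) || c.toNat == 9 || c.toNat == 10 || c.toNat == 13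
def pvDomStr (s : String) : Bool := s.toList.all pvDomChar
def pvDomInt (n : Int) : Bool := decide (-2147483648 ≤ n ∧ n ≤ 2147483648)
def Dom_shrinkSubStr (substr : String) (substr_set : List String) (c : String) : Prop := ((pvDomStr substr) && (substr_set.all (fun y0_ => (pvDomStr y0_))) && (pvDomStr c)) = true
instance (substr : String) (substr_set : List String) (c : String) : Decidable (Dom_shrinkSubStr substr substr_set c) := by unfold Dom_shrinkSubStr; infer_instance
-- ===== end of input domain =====

-- ===== PORT A =====
-- B changes only the decomposition (collect-then-slice vs fused scan); equivalence is about the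
-- RETURN value only: both Pythons also empty substr_set of the scanned prefix identically, but
-- that in-place mutation is not modelled here.
-- A's early-returning for-loop: scan chars in order; on the first char equal to c return the
-- rest (substr[i+1:]); falling off the loop returns substr unchanged. (substr_set.discard has
-- no effect on the return value.)
def pvShrinkLoopA (c : String) : List Char → Option (List Char)
  | [] => none
  | ch :: rest => if String.ofList [ch] == c then some rest else pvShrinkLoopA c rest

def shrinkSubStr (substr : String) (_substr_set : List String) (c : String) : String :=
  match pvShrinkLoopA c substr.toList with
  | some rest => String.ofList rest
  | none => substr

-- ===== PORT B =====
-- hits = [i for i, ch in enumerate(substr) if ch == c]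
def pvHitsB (cs : List Char) (c : String) : List Int :=
  ((PySem.List.enumerate cs).filter (fun q => String.ofList [q.2] == c)).map Prod.fst

def shrinkSubStr_alt (substr : String) (_substr_set : List String) (c : String) : String :=
  match pvHitsB substr.toList c with
  | i :: _ => String.ofList (PySem.List.slice substr.toList (some (i + 1)) none)  -- substr[cut:]
  | [] => substr

-- ===== PRECONDITION & SPEC =====
def Spec_shrinkSubStr (substr : String) (substr_set : List String) (c : String) (out : String) : Prop := out = shrinkSubStr_alt substr substr_set c
instance (substr : String) (substr_set : List String) (c : String) (out : String) : Decidable (Spec_shrinkSubStr substr substr_set c out) := by unfold Spec_shrinkSubStr; infer_instance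

-- ===== CLAIM (what is proved, stated in full; the proofs are below) =====
def Claim_equal_shrinkSubStr : Prop := ∀ (substr : String) (substr_set : List String) (c : String), Dom_shrinkSubStr substr substr_set c → Spec_shrinkSubStr substr substr_set c (shrinkSubStr substr substr_set c)

-- ===== LEMMAS AND PROOFS =====

lemma pvShrinkLoopA_eq_findIdx? (c : String) (cs : List Char) :
    pvShrinkLoopA c cs = (cs.findIdx? (fun ch => String.ofList [ch] == c)).map (fun k => cs.drop (k+1)) := by
  induction cs with
  | nil => rfl
  | cons ch rest ih =>
    simp only [pvShrinkLoopA, List.findIdx?_cons]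
    by_cases h : String.ofList [ch] == c
    · simp [h]
    · simp only [h, Bool.false_eq_true, if_false, ih, Option.map_map]
      rfl

lemma pvHits_head? (c : String) (cs : List Char) : ∀ s : Int,
    (((PySem.List.enumerate cs s).filter (fun q => String.ofList [q.2] == c)).map Prod.fst).head?
      = Option.map (fun k : Nat => s + (k : Int)) (cs.findIdx? (fun ch => String.ofList [ch] == c)) := by
  induction cs with
  | nil => intro s; simp [PySem.List.enumerate_nil]
  | cons ch rest ih =>
    intro s
    simp only [PySem.List.enumerate_cons, List.filter_cons, List.findIdx?_cons]
    by_cases h : String.ofList [ch] == c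
    · simp [h]
    · simp only [h, Bool.false_eq_true, if_false]
      rw [ih (s+1)]
      cases hf : rest.findIdx? (fun ch => String.ofList [ch] == c) with
      | none => simp
      | some k => simp; ring

-- ===== VERDICT (by name: the statement is the Claim_ definition above) =====
theorem shrinkSubStr_spec : Claim_equal_shrinkSubStr := by
  intro substr substr_set c _
  unfold Spec_shrinkSubStr shrinkSubStr shrinkSubStr_alt pvHitsB
  rw [pvShrinkLoopA_eq_findIdx?]
  have hh := pvHits_head? c substr.toList 0
  cases hf : substr.toList.findIdx? (fun ch => String.ofList [ch] == c) with
  | none =>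
    rw [hf] at hh
    rw [Option.map_none, List.head?_eq_none_iff] at hh
    rw [hh]
    rfl
  | some k =>
    rw [hf, Option.map_some, zero_add] at hh
    obtain ⟨t, ht⟩ : ∃ t, ((PySem.List.enumerate substr.toList 0).filter (fun q => String.ofList [q.2] == c)).map Prod.fst = ((k : Int)) :: t := by
      cases hl : ((PySem.List.enumerate substr.toList 0).filter (fun q => String.ofList [q.2] == c)).map Prod.fst with
      | nil => rw [hl] at hh; simp at hh
      | cons a t => rw [hl] at hh; simp at hh; exact ⟨t, by rw [hh]⟩
    rw [ht]
    show String.ofList (List.drop (k+1) substr.toList)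
        = String.ofList (PySem.List.slice substr.toList (some ((k : Int) + 1)) none)
    have hcast : (k : Int) + 1 = ((k + 1 : Nat) : Int) := by push_cast; ring
    rw [hcast, PySem.List.slice_from_natCast]
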